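-- pv_equiv track=rewrite | github.com/JeongSeongJin9906/Baekjoon_python | 백준/Gold/1016. 제곱 ㄴㄴ 수/제곱 ㄴㄴ 수.py | generate_square_multiples
-- ===== SOURCE A (Python) =====
-- def generate_square_multiples(small,large,prime_number):
--     is_square_multiples = [True]*(large-small+1)
--     for i in prime_number:
--         for j in range(-(small%(i*i)),large-small+1,i*i):
--             if j>=0:
--                 is_square_multiples[j] = False
--             else:
--                 pass
--     square_multiples = [i+small for i, square_multiple in enumerate(is_square_multiples) if square_multiple]
--     return square_multiples
-- ===== SOURCE B (Python) =====
-- def generate_square_multiples(small, large, prime_number):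
--     return [n for n in range(small, large + 1)
--             if all(n % (p * p) != 0 for p in prime_number)]
-- ===== Notes on version B (the rewrite author's own statement) =====
-- stated objective: simpler
-- what changed: Replaced the boolean sieve array (marking multiples of each p^2 by stepping through index ranges) with a direct one-line comprehension that keeps each n in [small, large] iff no p^2 divides it; loop nesting is inverted (numbers outer, primes inner) and no array is maintained.
import Mathlib
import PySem

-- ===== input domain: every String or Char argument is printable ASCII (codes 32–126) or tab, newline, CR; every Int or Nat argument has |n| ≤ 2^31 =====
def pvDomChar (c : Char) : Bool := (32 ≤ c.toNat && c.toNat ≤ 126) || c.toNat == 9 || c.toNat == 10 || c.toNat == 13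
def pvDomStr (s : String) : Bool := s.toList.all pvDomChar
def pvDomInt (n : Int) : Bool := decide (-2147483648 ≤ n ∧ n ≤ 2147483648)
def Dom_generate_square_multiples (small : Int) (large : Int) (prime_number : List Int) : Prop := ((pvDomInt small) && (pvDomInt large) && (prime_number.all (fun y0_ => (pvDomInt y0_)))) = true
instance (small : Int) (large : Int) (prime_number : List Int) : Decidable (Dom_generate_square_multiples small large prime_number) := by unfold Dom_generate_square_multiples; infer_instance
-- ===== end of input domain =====

-- B replaces A's boolean marking sieve by a per-number trial-division filter (simpler, not faster).


-- ===== PORT A =====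
def generate_square_multiples (small : Int) (large : Int) (prime_number : List Int) : List Int :=
  -- the Python list of booleans is modelled as Array Bool (constant-time element assignment);
  -- the in-range index assignment is_square_multiples[j] = False is Array.setIfInBounds (j always in range here)
  let is_square_multiples : Array Bool := (PySem.List.pyRepeat [true] (large - small + 1)).toArray
  let is_square_multiples : Array Bool := prime_number.foldl (fun arr i =>
      (PySem.List.pyRange (-(PySem.Int.mod small (i*i))) (large - small + 1) (i*i)).foldl
        (fun arr j => if j ≥ 0 then arr.setIfInBounds j.toNat false else arr) arr)
    is_square_multiples
  -- enumerate(xs) is the index-value zip, built tail-recursively via List.zipIdx (= PySem.List.enumerate_eq_zipIdx_map)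
  ((is_square_multiples.toList.zipIdx.map (fun p => ((0 : Int) + (p.2 : Int), p.1))).filter
      (fun p => p.2)).map (fun p => p.1 + small)

-- ===== PORT B =====
def generate_square_multiples_alt (small : Int) (large : Int) (prime_number : List Int) : List Int :=
  (PySem.List.pyRange small (large + 1) 1).filter
    (fun n => prime_number.all (fun p => !(PySem.Int.mod n (p*p) == 0)))

-- ===== PRECONDITION & SPEC =====
-- Pre_ excludes exactly the inputs where A raises ZeroDivisionError: 0 among the primes (small % (0*0)).
def Pre_generate_square_multiples (small : Int) (large : Int) (prime_number : List Int) : Prop :=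
  (0 : Int) ∉ prime_number
instance (small : Int) (large : Int) (prime_number : List Int) : Decidable (Pre_generate_square_multiples small large prime_number) := by unfold Pre_generate_square_multiples; infer_instance
def pvWitness_generate_square_multiples : Int × Int × List Int := (1, 20, [2, 3, 5])
def Spec_generate_square_multiples (small : Int) (large : Int) (prime_number : List Int) (out : List Int) : Prop := out = generate_square_multiples_alt small large prime_number
instance (small : Int) (large : Int) (prime_number : List Int) (out : List Int) : Decidable (Spec_generate_square_multiples small large prime_number out) := by unfold Spec_generate_square_multiples; infer_instance

-- ===== CLAIM (what is proved, stated in full; the proofs are below) =====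
def Claim_equal_generate_square_multiples : Prop := ∀ (small : Int) (large : Int) (prime_number : List Int), Dom_generate_square_multiples small large prime_number → Pre_generate_square_multiples small large prime_number → Spec_generate_square_multiples small large prime_number (generate_square_multiples small large prime_number)

-- ===== LEMMAS AND PROOFS =====

-- the inner marking loop of A, as a function
def pvMark (arr : Array Bool) (j : Int) : Array Bool :=
  if j ≥ 0 then arr.setIfInBounds j.toNat false else arr

theorem pvMark_size (arr : Array Bool) (j : Int) : (pvMark arr j).size = arr.size := by
  unfold pvMark
  split_ifs with h
  · exact Array.size_setIfInBounds
  · rfl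

theorem pvMarkFold_size (r : List Int) (arr : Array Bool) :
    (r.foldl pvMark arr).size = arr.size := by
  induction r generalizing arr with
  | nil => rfl
  | cons j r ih => simp only [List.foldl_cons]; rw [ih, pvMark_size]

theorem pvMark_getElem? (arr : Array Bool) (j : Int) (k : Nat) :
    (pvMark arr j)[k]? = if j = (k : Int) ∧ k < arr.size then some false else arr[k]? := by
  unfold pvMark
  by_cases h : j ≥ 0
  · rw [if_pos h, Array.getElem?_setIfInBounds]
    by_cases hjk : j = (k : Int)
    · have h2 : j.toNat = k := by omega
      by_cases hk : k < arr.size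
      · simp [hjk, hk]
      · simp [h2, hk]
    · have : j.toNat ≠ k := by omega
      simp [this, hjk]
  · rw [if_neg h]
    have : ¬ (j = (k : Int) ∧ k < arr.size) := by
      rintro ⟨hj, -⟩; omega
    rw [if_neg this]

theorem pvMarkFold_getElem? (r : List Int) (arr : Array Bool) (k : Nat) :
    (r.foldl pvMark arr)[k]? =
      if (k : Int) ∈ r ∧ k < arr.size then some false else arr[k]? := by
  induction r generalizing arr with
  | nil => simp
  | cons j r ih =>
    simp only [List.foldl_cons]
    rw [ih, pvMark_size, pvMark_getElem?]
    simp only [List.mem_cons]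
    by_cases hk : k < arr.size
    · by_cases hmem : (k : Int) ∈ r
      · simp [hmem, hk]
      · by_cases hjk : j = (k : Int)
        · simp [hmem, hk, hjk]
        · have : ¬ ((k : Int) = j ∨ (k : Int) ∈ r) := by
            rintro (h | h)
            exacts [hjk h.symm, hmem h]
          simp [hjk, hk, hmem, eq_comm]
    · simp [hk]

-- membership in A's marking range, translated to divisibility by i*i
theorem pvMem_range_iff (small large : Int) (i : Int) (hi : i ≠ 0) (k : Nat) :
    ((k : Int) ∈ PySem.List.pyRange (-(PySem.Int.mod small (i*i))) (large - small + 1) (i*i))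
      ↔ ((k : Int) < large - small + 1 ∧ (i*i) ∣ ((k : Int) + small)) := by
  have hq : 0 < i * i := mul_self_pos.2 hi
  rw [PySem.List.mem_pyRange_iff_of_pos hq]
  have hnn : 0 ≤ PySem.Int.mod small (i*i) := PySem.Int.mod_nonneg small hq
  have hdecomp := PySem.Int.floordiv_mul_add_mod small (i*i)
  constructor
  · rintro ⟨_, hlt, d, hd⟩
    refine ⟨hlt, PySem.Int.floordiv small (i*i) + d, ?_⟩
    have : (k : Int) + PySem.Int.mod small (i*i) = (i*i) * d := by omega
    nlinarith [hdecomp]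
  · rintro ⟨hlt, d, hd⟩
    refine ⟨by omega, hlt, d - PySem.Int.floordiv small (i*i), ?_⟩
    have : (k : Int) - -(PySem.Int.mod small (i*i)) = (k : Int) + PySem.Int.mod small (i*i) := by ring
    rw [this]
    nlinarith [hdecomp]

-- the whole sieve, pointwise: after folding all primes, cell k is true iff no p*p divides k+small
theorem pvSieve_getElem? (small large : Int) (ps : List Int) (h0 : (0:Int) ∉ ps)
    (arr : Array Bool) (hlen : arr.size = (large - small + 1).toNat)
    (k : Nat) (hk : k < arr.size) :
    (ps.foldl (fun arr i =>
        (PySem.List.pyRange (-(PySem.Int.mod small (i*i))) (large - small + 1) (i*i)).foldl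
          pvMark arr) arr)[k]? =
      some (arr[k] && ps.all (fun p => !(PySem.Int.mod ((k : Int) + small) (p*p) == 0))) := by
  induction ps generalizing arr with
  | nil => simp [Array.getElem?_eq_getElem hk]
  | cons p ps ih =>
    have hp : p ≠ 0 := fun h => h0 (h ▸ List.mem_cons_self)
    have h0' : (0:Int) ∉ ps := fun h => h0 (List.mem_cons_of_mem _ h)
    simp only [List.foldl_cons]
    set arr' := (PySem.List.pyRange (-(PySem.Int.mod small (p*p))) (large - small + 1) (p*p)).foldl pvMark arr with harr'
    have hlen' : arr'.size = arr.size := pvMarkFold_size _ _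
    have hk' : k < arr'.size := by omega
    rw [ih h0' arr' (by omega) (by omega)]
    have hget : arr'[k]? = if (p*p) ∣ ((k:Int) + small) then some false else arr[k]? := by
      have hkL : (k : Int) < large - small + 1 := by
        rw [hlen] at hk; omega
      rw [harr']
      simp only [pvMarkFold_getElem?]
      simp [pvMem_range_iff small large p hp, hk, hkL]
    have hval : arr'[k] = (arr[k] && !(PySem.Int.mod ((k:Int) + small) (p*p) == 0)) := by
      have := hget
      rw [Array.getElem?_eq_getElem hk', Array.getElem?_eq_getElem hk] at this
      split_ifs at this with hdvd
      · have : arr'[k] = false := by exact Option.some.inj this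
        rw [this]
        have : PySem.Int.mod ((k:Int) + small) (p*p) = 0 :=
          (PySem.Int.mod_eq_zero_iff_dvd _ _).2 hdvd
        simp [this]
      · have heq : arr'[k] = arr[k] := Option.some.inj this
        rw [heq]
        have : ¬ PySem.Int.mod ((k:Int) + small) (p*p) = 0 :=
          fun h => hdvd ((PySem.Int.mod_eq_zero_iff_dvd _ _).1 h)
        simp [this]
    rw [hval]
    simp [Bool.and_assoc]

theorem pvSieveFold_size (small large : Int) (ps : List Int) (arr : Array Bool) :
    (ps.foldl (fun arr i =>
        (PySem.List.pyRange (-(PySem.Int.mod small (i*i))) (large - small + 1) (i*i)).foldl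
          pvMark arr) arr).size = arr.size := by
  induction ps generalizing arr with
  | nil => rfl
  | cons p ps ih => simp only [List.foldl_cons]; rw [ih, pvMarkFold_size]

-- ===== VERDICT (by name: the statement is the Claim_ definition above) =====
theorem generate_square_multiples_spec : Claim_equal_generate_square_multiples := by
  intro small large ps _hdom hpre
  unfold Spec_generate_square_multiples
  unfold generate_square_multiples generate_square_multiples_alt
  simp only [show (fun (arr : Array Bool) (j : Int) =>
      if j ≥ 0 then arr.setIfInBounds j.toNat false else arr) = pvMark from rfl]
  rw [PySem.List.pyRepeat_singleton]
  set N : Nat := (large - small + 1).toNat with hN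
  set final : Array Bool := ps.foldl (fun arr i =>
      (PySem.List.pyRange (-(PySem.Int.mod small (i*i))) (large - small + 1) (i*i)).foldl
        pvMark arr) (List.replicate N true).toArray with hfinal
  have hlen : final.size = N := by
    rw [hfinal, pvSieveFold_size]; simp
  have hpt : ∀ (k : Nat), k < N →
      final[k]? = some (ps.all (fun p => !(PySem.Int.mod ((k : Int) + small) (p*p) == 0))) := by
    intro k hk
    rw [hfinal, pvSieve_getElem? small large ps hpre _ (by simp [hN]) k (by simp [hk])]
    simp
  -- rewrite A's comprehension over enumerate as a filtered map over List.range
  rw [show final.toList.zipIdx.map (fun p => ((0 : Int) + (p.2 : Int), p.1)) =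
        PySem.List.enumerate final.toList from
      (PySem.List.enumerate_eq_zipIdx_map final.toList 0).symm]
  rw [PySem.List.enumerate_eq_map_pyRange final.toList false, List.filter_map, List.map_map]
  have hlenI : PySem.List.len final.toList = (N : Int) := by simp [hlen]
  rw [hlenI, PySem.List.pyRange_one, List.filter_map, List.map_map]
  -- rewrite B over List.range as well
  have hB : PySem.List.pyRange small (large + 1) 1 =
      (List.range N).map (fun k : Nat => small + (k : Int)) := by
    rw [PySem.List.pyRange_one, show (large + 1 - small).toNat = N from by omega]
  rw [hB, List.filter_map]
  simp only [Function.comp_def, zero_add, show ((N : Int) - 0).toNat = N from by omega]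
  rw [List.filter_congr (l := List.range N)
      (p := fun k : Nat => PySem.List.pyGetD final.toList ((k : Nat) : Int) false)
      (q := fun k : Nat => ps.all fun p => !(PySem.Int.mod (small + (k : Int)) (p*p) == 0))
      ?_]
  · apply List.map_congr_left
    intro k _
    exact add_comm _ _
  · intro k hk
    have hk' : k < N := List.mem_range.mp hk
    simp only [PySem.List.pyGetD_natCast, List.getD_eq_getElem?_getD, Array.getElem?_toList, hpt k hk']
    rw [show small + (k : Int) = (k : Int) + small from add_comm _ _]
    rfl
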